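-- pv_equiv track=rewrite | github.com/fuzzy-dynamics/putnam-2025 | rough/verify_2025_A3.py | pair_state
-- ===== SOURCE A (Python) =====
-- from typing import Tuple, Set, List, Dict, Optional
--
-- def pair_state(s: Tuple[int, ...]) -> Tuple[int, ...]:
--     """
--     Apply the pairing function to state s.
--
--     For s != 0^n, let i be the first index with s[i] != 0.
--     Then pair(s) swaps s[i] between 1 <-> 2 (i.e., sets it to 3 - s[i]).
--     """
--     # Handle zero string (though pairing is only defined for non-zero strings)
--     if all(d == 0 for d in s):
--         return None  # pairing not defined for zero string
--
--     # Find first non-zero position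
--     first_nonzero_idx = None
--     for i, digit in enumerate(s):
--         if digit != 0:
--             first_nonzero_idx = i
--             break
--
--     if first_nonzero_idx is None:
--         return None
--
--     # Create paired state
--     paired = list(s)
--     paired[first_nonzero_idx] = 3 - s[first_nonzero_idx]
--     return tuple(paired)
-- ===== SOURCE B (Python) =====
-- def pair_state(s):
--     if not s:
--         return None
--     head, rest = s[0], s[1:]
--     if head != 0:
--         return (3 - head,) + rest
--     r = pair_state(rest)
--     return None if r is None else (0,) + r
-- ===== Notes on version B (the rewrite author's own statement) =====
-- stated objective: simpler
-- what changed: Replaced A's iterative staged scheme (all-zero guard pass, enumerate-with-break index search, list copy + index mutation) by direct structural recursion on the tuple: flip the head if nonzero, otherwise recurse on the tail and re-attach the zero, with None propagating from the empty case.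
import Mathlib
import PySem

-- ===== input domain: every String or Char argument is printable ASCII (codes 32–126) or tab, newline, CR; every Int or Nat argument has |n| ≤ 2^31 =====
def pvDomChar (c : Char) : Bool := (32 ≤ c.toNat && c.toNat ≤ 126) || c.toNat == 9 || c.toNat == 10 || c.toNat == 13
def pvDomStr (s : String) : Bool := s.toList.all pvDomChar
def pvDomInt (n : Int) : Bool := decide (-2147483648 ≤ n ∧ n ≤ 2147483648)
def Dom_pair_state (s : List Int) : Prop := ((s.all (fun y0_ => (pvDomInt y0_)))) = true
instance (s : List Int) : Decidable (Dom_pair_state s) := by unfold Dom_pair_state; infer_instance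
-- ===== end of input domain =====

-- B replaces A's staged iterative scheme (all-zero guard, enumerate search, copy+mutate)
-- by direct structural recursion on the list: a simpler decomposition, same return values.


-- ===== PORT A =====
-- A's enumerate loop with break: first index (counting from i) whose digit is nonzero
def pvFindNZ : List Int → Nat → Option Nat
  | [], _ => none
  | d :: rest, i => if d ≠ 0 then some i else pvFindNZ rest (i + 1)

def pair_state (s : List Int) : Option (List Int) :=
  if s.all (fun d => d == 0) then none
  else
    match pvFindNZ s 0 with
    | none => none
    | some i => some (s.set i (3 - s.getD i 0))

-- ===== PORT B =====
-- structural recursion: flip the head if nonzero, else recurse on the tail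
def pair_state_alt : List Int → Option (List Int)
  | [] => none
  | head :: rest =>
    if head ≠ 0 then some ((3 - head) :: rest)
    else (pair_state_alt rest).map (fun r => 0 :: r)

-- ===== PRECONDITION & SPEC =====
def Spec_pair_state (s : List Int) (out : Option (List Int)) : Prop := out = pair_state_alt s
instance (s : List Int) (out : Option (List Int)) : Decidable (Spec_pair_state s out) := by unfold Spec_pair_state; infer_instance

-- ===== CLAIM =====
def Claim_equal_pair_state : Prop := ∀ (s : List Int), Dom_pair_state s → Spec_pair_state s (pair_state s)

-- ===== LEMMAS AND PROOFS =====

theorem pvFindNZ_shift (s : List Int) (k : Nat) :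
    pvFindNZ s k = (pvFindNZ s 0).map (· + k) := by
  induction s generalizing k with
  | nil => simp [pvFindNZ]
  | cons d rest ih =>
    by_cases h : d = 0
    · simp only [pvFindNZ, h]
      rw [ih (k + 1), ih 1]
      simp only [if_neg (not_not_intro rfl), Option.map_map]
      cases pvFindNZ rest 0 with
      | none => simp
      | some v => simp; omega
    · simp [pvFindNZ, h]

theorem pair_state_cons (d : Int) (rest : List Int) :
    pair_state (d :: rest) =
      if d ≠ 0 then some ((3 - d) :: rest) else (pair_state rest).map (d :: ·) := by
  by_cases h : d = 0
  · subst h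
    simp only [pair_state, pvFindNZ, List.all_cons, beq_self_eq_true, Bool.true_and,
      if_neg (by simp : ¬((0:Int) ≠ 0)), pvFindNZ_shift rest 1]
    by_cases hz : rest.all (fun x => x == 0)
    · simp [hz]
    · simp only [if_neg hz]
      cases hfind : pvFindNZ rest 0 with
      | none => simp
      | some i => simp
  · simp [pair_state, pvFindNZ, h]

-- ===== VERDICT =====
theorem pair_state_eq_alt (s : List Int) : pair_state s = pair_state_alt s := by
  induction s with
  | nil => simp [pair_state, pair_state_alt]
  | cons d rest ih =>
    rw [pair_state_cons, ih]
    by_cases h : d = 0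
    · subst h; simp [pair_state_alt]
    · simp [pair_state_alt, h]

theorem pair_state_spec : Claim_equal_pair_state := by
  intro s _
  exact pair_state_eq_alt s
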